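-- pv_equiv track=rewrite | github.com/Starman26/FRED_WEB | src/agent/knowledge/lab_knowledge.py | get_terminology_definition
-- ===== SOURCE A (Python) =====
-- TERMINOLOGY = {
--     "ALFREDO": "Robot colaborativo principal del laboratorio (UR5e en Estación 1)",
--     "Interlock": "Sistema de seguridad que impide operación cuando hay condiciones inseguras",
--     "Rutina": "Programa de movimientos predefinido para el cobot",
--     "Modo RUN": "PLC ejecutando programa normalmente",
--     "Modo STOP": "PLC detenido, no ejecuta programa",
--     "OEE": "Overall Equipment Effectiveness - Eficiencia general del equipo",
--     "Celda": "Área de trabajo delimitada de una estación",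
--     "Pick & Place": "Operación de tomar y colocar componentes",
--     "Profinet": "Protocolo de comunicación industrial de Siemens",
--     "TIA Portal": "Software de programación para PLCs Siemens",
--     "Polyscope": "Software de programación para robots Universal Robots",
--     "Teach Pendant": "Control manual para programar movimientos del cobot",
--     "TCP": "Tool Center Point - Punto central de la herramienta del robot",
--     "Payload": "Carga máxima que puede manipular el robot",
--     "Ciclo": "Una ejecución completa de la rutina de producción",
--     "Tiempo de ciclo": "Duración de un ciclo completo de producción",
-- }
--
-- def get_terminology_definition(term: str) -> str:
--     """Busca la definición de un término"""
--     term_upper = term.upper()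
--     term_lower = term.lower()
--
--     # Buscar coincidencia exacta o parcial
--     for key, value in TERMINOLOGY.items():
--         if key.upper() == term_upper or key.lower() == term_lower:
--             return f"**{key}**: {value}"
--
--     # Buscar coincidencia parcial
--     for key, value in TERMINOLOGY.items():
--         if term_lower in key.lower() or term_lower in value.lower():
--             return f"**{key}**: {value}"
--
--     return f"No se encontró definición para '{term}'"
-- ===== SOURCE B (Python) =====
-- TERMINOLOGY = {
--     "ALFREDO": "Robot colaborativo principal del laboratorio (UR5e en Estación 1)",
--     "Interlock": "Sistema de seguridad que impide operación cuando hay condiciones inseguras",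
--     "Rutina": "Programa de movimientos predefinido para el cobot",
--     "Modo RUN": "PLC ejecutando programa normalmente",
--     "Modo STOP": "PLC detenido, no ejecuta programa",
--     "OEE": "Overall Equipment Effectiveness - Eficiencia general del equipo",
--     "Celda": "Área de trabajo delimitada de una estación",
--     "Pick & Place": "Operación de tomar y colocar componentes",
--     "Profinet": "Protocolo de comunicación industrial de Siemens",
--     "TIA Portal": "Software de programación para PLCs Siemens",
--     "Polyscope": "Software de programación para robots Universal Robots",
--     "Teach Pendant": "Control manual para programar movimientos del cobot",
--     "TCP": "Tool Center Point - Punto central de la herramienta del robot",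
--     "Payload": "Carga máxima que puede manipular el robot",
--     "Ciclo": "Una ejecución completa de la rutina de producción",
--     "Tiempo de ciclo": "Duración de un ciclo completo de producción",
-- }
--
-- def get_terminology_definition(term: str) -> str:
--     """Busca la definición de un término (single pass)."""
--     term_upper = term.upper()
--     term_lower = term.lower()
--     partial = None
--     for key, value in TERMINOLOGY.items():
--         if key.upper() == term_upper or key.lower() == term_lower:
--             return f"**{key}**: {value}"
--         if partial is None and (term_lower in key.lower() or term_lower in value.lower()):
--             partial = (key, value)
--     if partial is not None:
--         key, value = partial
--         return f"**{key}**: {value}"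
--     return f"No se encontró definición para '{term}'"
-- ===== Notes on version B (the rewrite author's own statement) =====
-- stated objective: alternative
-- what changed: Replaced A's two sequential scans of TERMINOLOGY (exact pass, then partial pass) by one single pass that returns immediately on an exact match and carries the first partial candidate to the end.
import Mathlib
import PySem

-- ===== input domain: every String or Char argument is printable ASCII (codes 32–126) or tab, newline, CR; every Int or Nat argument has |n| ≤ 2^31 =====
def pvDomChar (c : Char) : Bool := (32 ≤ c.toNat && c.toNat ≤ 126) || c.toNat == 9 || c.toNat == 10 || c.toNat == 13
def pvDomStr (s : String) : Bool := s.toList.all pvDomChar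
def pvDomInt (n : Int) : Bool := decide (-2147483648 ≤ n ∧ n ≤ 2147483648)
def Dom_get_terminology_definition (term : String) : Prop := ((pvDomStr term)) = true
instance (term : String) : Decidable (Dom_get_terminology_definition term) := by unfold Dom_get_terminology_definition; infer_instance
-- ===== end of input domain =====

-- B replaces A's two scans over TERMINOLOGY by a single pass that records the first
-- partial match while still letting a later exact match win (objective: simpler/alternative).

-- ===== PORT A =====
def TERMINOLOGY : List (String × String) := [
  ("ALFREDO", "Robot colaborativo principal del laboratorio (UR5e en Estación 1)"),
  ("Interlock", "Sistema de seguridad que impide operación cuando hay condiciones inseguras"),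
  ("Rutina", "Programa de movimientos predefinido para el cobot"),
  ("Modo RUN", "PLC ejecutando programa normalmente"),
  ("Modo STOP", "PLC detenido, no ejecuta programa"),
  ("OEE", "Overall Equipment Effectiveness - Eficiencia general del equipo"),
  ("Celda", "Área de trabajo delimitada de una estación"),
  ("Pick & Place", "Operación de tomar y colocar componentes"),
  ("Profinet", "Protocolo de comunicación industrial de Siemens"),
  ("TIA Portal", "Software de programación para PLCs Siemens"),
  ("Polyscope", "Software de programación para robots Universal Robots"),
  ("Teach Pendant", "Control manual para programar movimientos del cobot"),
  ("TCP", "Tool Center Point - Punto central de la herramienta del robot"),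
  ("Payload", "Carga máxima que puede manipular el robot"),
  ("Ciclo", "Una ejecución completa de la rutina de producción"),
  ("Tiempo de ciclo", "Duración de un ciclo completo de producción")]

def pvFmt (k v : String) : String := "**" ++ k ++ "**: " ++ v

-- A's first loop: exact (case-insensitive) key match, early return
def aLoop1 (tu tl : String) : List (String × String) → Option String
  | [] => none
  | (k, v) :: rest =>
      if PySem.Str.upper k == tu || PySem.Str.lower k == tl then some (pvFmt k v)
      else aLoop1 tu tl rest

-- A's second loop: first partial match, else the not-found message
def aLoop2 (term tl : String) : List (String × String) → String
  | [] => "No se encontró definición para '" ++ term ++ "'"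
  | (k, v) :: rest =>
      if PySem.Str.isIn tl (PySem.Str.lower k) || PySem.Str.isIn tl (PySem.Str.lower v) then pvFmt k v
      else aLoop2 term tl rest

def get_terminology_definition (term : String) : String :=
  let tu := PySem.Str.upper term
  let tl := PySem.Str.lower term
  match aLoop1 tu tl TERMINOLOGY with
  | some s => s
  | none => aLoop2 term tl TERMINOLOGY

-- ===== PORT B =====
-- single pass: exact match returns at once; the first partial candidate is carried along
def bLoop (term tu tl : String) (part : Option (String × String)) :
    List (String × String) → String
  | [] =>
      match part with
      | some (k, v) => pvFmt k v
      | none => "No se encontró definición para '" ++ term ++ "'"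
  | (k, v) :: rest =>
      if PySem.Str.upper k == tu || PySem.Str.lower k == tl then pvFmt k v
      else
        bLoop term tu tl
          (if part.isNone &&
              (PySem.Str.isIn tl (PySem.Str.lower k) || PySem.Str.isIn tl (PySem.Str.lower v))
           then some (k, v) else part) rest

def get_terminology_definition_alt (term : String) : String :=
  let tu := PySem.Str.upper term
  let tl := PySem.Str.lower term
  bLoop term tu tl none TERMINOLOGY

-- ===== PRECONDITION & SPEC =====
def Spec_get_terminology_definition (term : String) (out : String) : Prop := out = get_terminology_definition_alt term
instance (term : String) (out : String) : Decidable (Spec_get_terminology_definition term out) := by unfold Spec_get_terminology_definition; infer_instance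

-- ===== CLAIM (what is proved, stated in full; the proofs are below) =====
def Claim_equal_get_terminology_definition : Prop := ∀ (term : String), Dom_get_terminology_definition term → Spec_get_terminology_definition term (get_terminology_definition term)

-- ===== LEMMAS AND PROOFS =====

-- B's single pass with carried candidate equals A's two passes, for any list and candidate.
lemma bLoop_eq (term tu tl : String) (l : List (String × String)) (c : Option (String × String)) :
    bLoop term tu tl c l =
      match aLoop1 tu tl l with
      | some s => s
      | none =>
          match c with
          | some (k, v) => pvFmt k v
          | none => aLoop2 term tl l := by
  induction l generalizing c with
  | nil => cases c <;> simp [bLoop, aLoop1, aLoop2]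
  | cons kv rest ih =>
      obtain ⟨k, v⟩ := kv
      by_cases hex : (PySem.Str.upper k == tu || PySem.Str.lower k == tl) = true
      · simp [bLoop, aLoop1, hex]
      · cases c with
        | some kv' =>
            simp [bLoop, aLoop1, hex, ih]
        | none =>
            by_cases hp : (PySem.Str.isIn tl (PySem.Str.lower k) ||
                PySem.Str.isIn tl (PySem.Str.lower v)) = true
            all_goals
              simp only [Bool.or_eq_true, PySem.Str.isIn_eq, PySem.Str.toList_lower] at hp
              simp [bLoop, aLoop1, aLoop2, hex, hp, ih]

-- ===== VERDICT (by name: the statement is the Claim_ definition above) =====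
theorem get_terminology_definition_spec : Claim_equal_get_terminology_definition := by
  intro term _
  unfold Spec_get_terminology_definition get_terminology_definition get_terminology_definition_alt
  rw [bLoop_eq]
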